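-- pv_equiv track=rewrite | github.com/YooGunWook/coding_test | 백준/카카오_코테_2021_1번.py | solution
-- ===== SOURCE A (Python) =====
-- def solution(new_id):
--
--     new_id = new_id.lower()
--     check_lis = ['-','_','.']
--
--     for i in new_id:
--         if i.isdigit() or i.isalpha() or i in check_lis:
--             continue
--         new_id = new_id.replace(i,'')
--
--     while True:
--         if '..' in new_id:
--             new_id = new_id.replace('..','.')
--         if '..' not in new_id:
--             break
--     try:
--         if new_id[-1] == '.':
--             new_id = new_id[0:len(new_id)-1]
--     except:
--         pass
--     try:
--         if new_id[0] == '.':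
--             new_id = new_id[1:len(new_id)]
--     except:
--         pass
--
--     if not new_id:
--         new_id = 'a'
--
--     if len(new_id) >= 16:
--         new_id = new_id[0:15]
--         if new_id[-1] == '.':
--             new_id = new_id[0:len(new_id)-1]
--
--     a = new_id[-1]
--     while len(new_id) <= 2:
--         new_id += a
--
--     return new_id
-- ===== SOURCE B (Python) =====
-- def solution(new_id):
--     out = []
--     for c in new_id.lower():
--         if c.isdigit() or c.isalpha() or c == '-' or c == '_':
--             out.append(c)
--         elif c == '.':
--             if not out or out[-1] != '.':
--                 out.append(c)
--     if out and out[-1] == '.':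
--         out.pop()
--     if out and out[0] == '.':
--         out.pop(0)
--     if not out:
--         out = ['a']
--     if len(out) > 15:
--         out = out[:15]
--         if out[-1] == '.':
--             out.pop()
--     while len(out) <= 2:
--         out.append(out[-1])
--     return ''.join(out)
-- ===== Notes on version B (the rewrite author's own statement) =====
-- stated objective: alternative
-- what changed: A removes each invalid character with a full-string replace inside the scan and then repeatedly rewrites '..' to '.' until fixpoint; B builds the cleaned id in a single pass that skips invalid characters and collapses consecutive dots against the last emitted character, so both multi-pass loops disappear (it trades A's C-level replace passes for one explicit Python loop).
import Mathlib
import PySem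

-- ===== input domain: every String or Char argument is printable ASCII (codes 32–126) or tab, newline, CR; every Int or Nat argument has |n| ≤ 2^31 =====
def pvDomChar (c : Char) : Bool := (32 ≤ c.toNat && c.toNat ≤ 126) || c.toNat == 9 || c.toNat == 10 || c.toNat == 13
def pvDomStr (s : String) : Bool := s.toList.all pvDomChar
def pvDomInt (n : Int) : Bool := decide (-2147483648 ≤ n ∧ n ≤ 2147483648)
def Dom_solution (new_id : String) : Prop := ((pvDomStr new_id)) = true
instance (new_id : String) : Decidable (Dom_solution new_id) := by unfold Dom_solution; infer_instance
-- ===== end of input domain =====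

-- B replaces A's remove-by-replace scan and repeated '..'→'.' rewriting with one pass that
-- filters and collapses dots against the last emitted character (objective: alternative).

-- ===== PORT A =====
-- structural model of str.replace; it and the lemmas up to pvReplaceDots_length_lt exist only to
-- justify termination of A's while-loop (cited by name in pvA_dots's decreasing_by)

def pvRepl (old new : List Char) : List Char → List Char
  | [] => []
  | c :: t =>
    if old.isPrefixOf (c :: t) then new ++ pvRepl old new (t.drop (old.length - 1))
    else c :: pvRepl old new t
  termination_by l => l.length
  decreasing_by all_goals (simp; try omega)

lemma pvRepl_go (old new : List Char) (hold : old ≠ []) :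
    ∀ (fuel : Nat) (l acc : List Char), l.length ≤ fuel →
      PySem.Chars.replace.go old new fuel l acc = acc.reverse ++ pvRepl old new l := by
  intro fuel
  induction fuel with
  | zero =>
    intro l acc hl
    have : l = [] := by cases l <;> simp_all
    subst this
    simp [PySem.Chars.replace.go, pvRepl]
  | succ n ih =>
    intro l acc hl
    cases l with
    | nil => simp [PySem.Chars.replace.go, pvRepl]
    | cons c t =>
      have hol : 1 ≤ old.length := List.length_pos_iff.mpr hold
      rw [PySem.Chars.replace.go]
      by_cases hp : old.isPrefixOf (c :: t)
      · simp only [hp, if_true]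
        have hdrop : List.drop old.length (c :: t) = t.drop (old.length - 1) := by
          cases old with
          | nil => simp_all
          | cons o os => simp
        rw [ih _ _ (by rw [hdrop]; simp at hl ⊢; omega)]
        rw [pvRepl]
        simp [hp, hdrop]
      · simp only [hp]
        rw [ih t (c :: acc) (by simp at hl ⊢; omega)]
        rw [pvRepl]
        simp [hp]

lemma pvReplace_eq_pvRepl (l old new : List Char) (hold : old ≠ []) :
    PySem.Chars.replace l old new = pvRepl old new l := by
  rw [PySem.Chars.replace]
  simp [List.isEmpty_iff, hold]
  rw [pvRepl_go old new hold l.length l [] le_rfl]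
  simp

def pvRdots : List Char → List Char
  | '.' :: '.' :: t => '.' :: pvRdots t
  | c :: t => c :: pvRdots t
  | [] => []

lemma pvRdots_cons (c : Char) (t : List Char) (h : ∀ u, c = '.' → t = '.' :: u → False) :
    pvRdots (c :: t) = c :: pvRdots t := by
  rw [pvRdots]
  exact h

lemma pvRepl_dots (l : List Char) : pvRepl ['.', '.'] ['.'] l = pvRdots l := by
  induction l using pvRdots.induct with
  | case1 t ih => rw [pvRepl, pvRdots]; simp [ih]
  | case2 c t h ih =>
    rw [pvRepl, pvRdots_cons c t h]
    have : ¬ (['.', '.'].isPrefixOf (c :: t) = true) := by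
      intro hp
      cases t with
      | nil => simp [List.isPrefixOf] at hp
      | cons b u =>
        simp [List.isPrefixOf] at hp
        exact h u hp.1.symm (by rw [← hp.2])
    simp [this, ih]
  | case3 => rw [pvRepl]; simp [pvRdots]

lemma pvRdots_length_le (l : List Char) : (pvRdots l).length ≤ l.length := by
  induction l using pvRdots.induct with
  | case1 t ih => rw [pvRdots]; simp; omega
  | case2 c t h ih => rw [pvRdots_cons c t h]; simpa using ih
  | case3 => simp [pvRdots]

lemma pvReplaceDots_length_lt (l : List Char) (h : ['.', '.'] <:+: l) :
    (PySem.Chars.replace l ['.', '.'] ['.']).length < l.length := by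
  rw [pvReplace_eq_pvRepl l _ _ (by simp), pvRepl_dots]
  induction l using pvRdots.induct with
  | case1 t ih =>
    rw [pvRdots]
    have := pvRdots_length_le t
    simp; omega
  | case2 c t hne ih =>
    rw [pvRdots_cons c t hne]
    have ht : ['.', '.'] <:+: t := by
      rcases (List.infix_cons_iff).mp h with hp | hi
      · exfalso
        cases t with
        | nil => exact absurd hp.length_le (by simp)
        | cons b u =>
          rcases hp with ⟨r, hr⟩
          simp at hr
          exact hne u hr.1.symm (by rw [← hr.2.1])
      · exact hi
    simpa using ih ht
  | case3 => exact absurd h.length_le (by simp)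

-- i.isdigit() or i.isalpha() or i in ['-','_','.']

def pvA_check (c : Char) : Bool :=
  PySem.Chars.isdigit c || PySem.Chars.isalpha c || ['-', '_', '.'].contains c

-- while True: if '..' in new_id: new_id = new_id.replace('..','.'); if '..' not in new_id: break

def pvA_dots (s : List Char) : List Char :=
  if h : PySem.Chars.isIn ['.', '.'] s then pvA_dots (PySem.Chars.replace s ['.', '.'] ['.']) else s
  termination_by s.length
  decreasing_by exact pvReplaceDots_length_lt s ((PySem.Chars.isIn_iff_infix _ s).mp h)

-- while len(new_id) <= 2: new_id += a

def pvA_pad (a : Char) (s : List Char) : List Char :=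
  if s.length ≤ 2 then pvA_pad a (s ++ [a]) else s
  termination_by 3 - s.length
  decreasing_by simp; omega

-- try: if new_id[-1] == '.': new_id = new_id[0:len(new_id)-1]  except: pass

def pvA_strip1 (s : List Char) : List Char :=
  if PySem.List.pyGet? s (-1) = some '.' then
    PySem.List.slice s (some 0) (some ((s.length : Int) - 1)) else s

-- try: if new_id[0] == '.': new_id = new_id[1:len(new_id)]  except: pass

def pvA_strip2 (s : List Char) : List Char :=
  if PySem.List.pyGet? s 0 = some '.' then
    PySem.List.slice s (some 1) (some (s.length : Int)) else s

-- if not new_id: new_id = 'a'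

def pvA_default (s : List Char) : List Char := if s = [] then ['a'] else s

-- if len(new_id) >= 16: new_id = new_id[0:15]; if new_id[-1] == '.': …

def pvA_clamp (s : List Char) : List Char :=
  if 16 ≤ s.length then
    (let t := PySem.List.slice s (some 0) (some 15)
     if PySem.List.pyGet? t (-1) = some '.' then
       PySem.List.slice t (some 0) (some ((t.length : Int) - 1)) else t)
  else s

def solution (new_id : String) : String :=
  -- new_id = new_id.lower(); for i in new_id: … new_id = new_id.replace(i,'')
  let s0 := PySem.Chars.lower new_id.toList
  let s1 := s0.foldl (fun t i => if pvA_check i then t else PySem.Chars.replace t [i] []) s0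
  let s6 := pvA_clamp (pvA_default (pvA_strip2 (pvA_strip1 (pvA_dots s1))))
  -- a = new_id[-1]: s6 is provably nonempty, so the none branch is unreachable (Python cannot raise here)
  match PySem.List.pyGet? s6 (-1) with
  | some a => String.ofList (pvA_pad a s6)
  | none => String.ofList s6

-- ===== PORT B =====

def pvB_keep (c : Char) : Bool :=
  PySem.Chars.isdigit c || PySem.Chars.isalpha c || c == '-' || c == '_'

-- one scan step: skip invalid chars; collapse '.' against the last emitted char

def pvB_scan (out : List Char) (c : Char) : List Char :=
  if pvB_keep c then out ++ [c]
  else if c == '.' then (if out.getLast? = some '.' then out else out ++ [c])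
  else out

-- while len(out) <= 2: out.append(out[-1])

def pvB_pad (s : List Char) : List Char :=
  match s.getLast? with
  | none => s
  | some a => if s.length ≤ 2 then pvB_pad (s ++ [a]) else s
  termination_by 3 - s.length
  decreasing_by simp; omega

def pvB_strip1 (s : List Char) : List Char :=
  if s.getLast? = some '.' then s.dropLast else s

def pvB_strip2 (s : List Char) : List Char :=
  match s with
  | '.' :: t => t
  | _ => s

def pvB_default (s : List Char) : List Char := if s = [] then ['a'] else s

def pvB_clamp (s : List Char) : List Char :=
  if 15 < s.length then
    (let t := s.take 15
     if t.getLast? = some '.' then t.dropLast else t)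
  else s

def solution_alt (new_id : String) : String :=
  let out0 := (PySem.Chars.lower new_id.toList).foldl pvB_scan []
  String.ofList (pvB_pad (pvB_clamp (pvB_default (pvB_strip2 (pvB_strip1 out0)))))

-- ===== PRECONDITION & SPEC =====
def Spec_solution (new_id : String) (out : String) : Prop := out = solution_alt new_id
instance (new_id : String) (out : String) : Decidable (Spec_solution new_id out) := by unfold Spec_solution; infer_instance

-- ===== CLAIM (what is proved, stated in full; the proofs are below) =====
def Claim_equal_solution : Prop := ∀ (new_id : String), Dom_solution new_id → Spec_solution new_id (solution new_id)

-- ===== LEMMAS AND PROOFS =====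

lemma pvRepl_single (i : Char) (l : List Char) :
    pvRepl [i] [] l = l.filter (· != i) := by
  induction l with
  | nil => rw [pvRepl]; simp
  | cons c t ih =>
    rw [pvRepl]
    by_cases h : c = i
    · subst h; simp [List.isPrefixOf, ih]
    · simp [List.isPrefixOf, Ne.symm h, h, ih]

lemma pvA_remove_loop (l : List Char) : ∀ (acc : List Char),
    l.foldl (fun t i => if pvA_check i then t else PySem.Chars.replace t [i] []) acc
      = acc.filter (fun c => pvA_check c || l.all (fun i => pvA_check i || c != i)) := by
  induction l with
  | nil => intro acc; simp
  | cons j l ih =>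
    intro acc
    rw [List.foldl_cons]
    by_cases hj : pvA_check j
    · simp only [hj, if_true, ih]
      apply List.filter_congr
      intro c _
      simp [hj]
    · simp only [hj, Bool.false_eq_true, if_false]
      rw [pvReplace_eq_pvRepl _ _ _ (by simp), pvRepl_single, ih, List.filter_filter]
      apply List.filter_congr
      intro c _
      by_cases hc : c = j
      · subst hc; simp [hj]
      · have hbne : (c != j) = true := by simp [hc]
        simp [hbne]

lemma pvA_remove_self (s : List Char) :
    s.foldl (fun t i => if pvA_check i then t else PySem.Chars.replace t [i] []) s
      = s.filter pvA_check := by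
  rw [pvA_remove_loop]
  apply List.filter_congr
  intro c hc
  cases h : pvA_check c
  · simp only [Bool.false_or, List.all_eq_false]
    exact ⟨c, hc, by simp [h]⟩
  · simp

def pvColl (pd : Bool) : List Char → List Char
  | [] => []
  | c :: t =>
    if c = '.' then (if pd then pvColl true t else '.' :: pvColl true t)
    else c :: pvColl false t

lemma pvCheck_eq (c : Char) : pvA_check c = (pvB_keep c || c == '.') := by
  simp [pvA_check, pvB_keep, Bool.or_assoc, beq_eq_decide]

lemma pvB_scan_eq (l : List Char) : ∀ (acc : List Char),
    l.foldl pvB_scan acc = acc ++ pvColl (decide (acc.getLast? = some '.')) (l.filter pvA_check) := by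
  induction l with
  | nil => intro acc; simp [pvColl]
  | cons c t ih =>
    intro acc
    rw [List.foldl_cons]
    by_cases hk : pvB_keep c
    · have hc : pvA_check c := by simp [pvCheck_eq, hk]
      have hcd : c ≠ '.' := by intro h; subst h; exact absurd hk (by decide)
      rw [pvB_scan]
      simp only [hk, if_true]
      rw [ih]
      simp [hc, pvColl, hcd]
    · by_cases hd : c = '.'
      · subst hd
        rw [pvB_scan]
        simp only [hk, Bool.false_eq_true, if_false, beq_self_eq_true, if_true]
        have hc : pvA_check '.' := by decide
        by_cases hl : acc.getLast? = some '.'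
        · simp only [hl, if_true, ih]
          simp [hc, pvColl]
        · simp only [hl, if_false, ih]
          simp [hc, pvColl]
      · have hc : ¬ pvA_check c := by simp [pvCheck_eq, hk, hd]
        rw [pvB_scan]
        simp only [hk, Bool.false_eq_true, if_false]
        rw [if_neg (by simp [hd])]
        rw [ih]
        simp [hc]

lemma pvColl_rdots (l : List Char) : ∀ pd, pvColl pd (pvRdots l) = pvColl pd l := by
  induction l using pvRdots.induct with
  | case1 t ih =>
    intro pd
    rw [pvRdots]
    simp [pvColl, ih]
  | case2 c t h ih =>
    intro pd
    rw [pvRdots_cons c t h]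
    simp [pvColl, ih]
  | case3 => intro pd; simp [pvRdots]

lemma pvColl_id (l : List Char) : ∀ pd, ¬ ['.', '.'] <:+: l →
    (pd = true → l.head? ≠ some '.') → pvColl pd l = l := by
  induction l with
  | nil => intro pd _ _; simp [pvColl]
  | cons c t ih =>
    intro pd hinf hpd
    have hti : ¬ ['.', '.'] <:+: t := by
      intro h
      rcases h with ⟨s, u, hsu⟩
      exact hinf ⟨c :: s, u, by simp [← hsu]⟩
    rw [pvColl]
    by_cases hc : c = '.'
    · subst hc
      have hpd' : pd = false := by
        cases pd
        · rfl
        · have := hpd rfl; simp at this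
      subst hpd'
      rw [if_pos rfl, if_neg (by simp)]
      have hth : t.head? ≠ some '.' := by
        intro hh
        cases t with
        | nil => simp at hh
        | cons b u =>
          simp at hh
          subst hh
          exact hinf ⟨[], u, by simp⟩
      rw [ih true hti (fun _ => hth)]
    · rw [if_neg hc]
      rw [ih false hti (by simp)]

lemma pvA_dots_eq (l : List Char) : pvA_dots l = pvColl false l := by
  induction l using pvA_dots.induct with
  | case1 s h ih =>
    rw [pvA_dots]
    rw [dif_pos h]
    rw [ih]
    rw [pvReplace_eq_pvRepl _ _ _ (by simp), pvRepl_dots, pvColl_rdots]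
  | case2 s h =>
    rw [pvA_dots, dif_neg h]
    rw [pvColl_id s false (by
      intro hi
      exact h ((PySem.Chars.isIn_iff_infix _ _).mpr hi)) (by simp)]

lemma pvGet_neg_one (m : List Char) : PySem.List.pyGet? m (-1) = m.getLast? := by
  simp [PySem.List.pyGet?, PySem.List.pyIdx?]
  rcases m.eq_nil_or_concat with h | ⟨t, a, h⟩ <;> subst h <;> simp

lemma pvGet_zero (m : List Char) : PySem.List.pyGet? m 0 = m.head? := by
  cases m <;> simp [PySem.List.pyGet?, PySem.List.pyIdx?]

lemma pvSlice_dropLast (m : List Char) (h : m ≠ []) :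
    PySem.List.slice m (some 0) (some ((m.length : Int) - 1)) = m.dropLast := by
  have h1 : 1 ≤ m.length := List.length_pos_iff.mpr h
  have : ((m.length : Int) - 1) = ((m.length - 1 : Nat) : Int) := by omega
  rw [this]
  rw [show ((0 : Int)) = ((0 : Nat) : Int) from rfl]
  rw [PySem.List.slice_natCast]
  simp [List.dropLast_eq_take]

lemma pvStrip_last (m : List Char) :
    (if PySem.List.pyGet? m (-1) = some '.' then
       PySem.List.slice m (some 0) (some ((m.length : Int) - 1)) else m)
      = (if m.getLast? = some '.' then m.dropLast else m) := by
  rw [pvGet_neg_one]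
  by_cases h : m.getLast? = some '.'
  · rw [if_pos h, if_pos h, pvSlice_dropLast]
    intro hn; subst hn; simp at h
  · rw [if_neg h, if_neg h]

lemma pvStrip_head (m : List Char) :
    (if PySem.List.pyGet? m 0 = some '.' then
       PySem.List.slice m (some 1) (some (m.length : Int)) else m)
      = (match m with | '.' :: t => t | _ => m) := by
  rw [pvGet_zero]
  cases m with
  | nil => simp
  | cons c t =>
    by_cases h : c = '.'
    · subst h
      rw [if_pos (by simp)]
      rw [show ((1 : Int)) = ((1 : Nat) : Int) from rfl, show (((('.' :: t).length : Nat)) : Int) = ((('.' :: t).length : Nat) : Int) from rfl]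
      rw [PySem.List.slice_natCast]
      simp
    · rw [if_neg (by simp [h])]
      cases t <;> simp_all

lemma pvPad_eq : ∀ (n : Nat) (a : Char) (m : List Char), 3 - m.length ≤ n →
    m.getLast? = some a → pvA_pad a m = pvB_pad m := by
  intro n
  induction n with
  | zero =>
    intro a m hn h
    rw [pvA_pad, if_neg (by omega), pvB_pad.eq_def, h]
    simp only [if_neg (by omega : ¬ m.length ≤ 2)]
  | succ n ih =>
    intro a m hn h
    by_cases hl : m.length ≤ 2
    · rw [pvA_pad, if_pos hl, pvB_pad.eq_def, h]
      simp only [if_pos hl]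
      exact ih a (m ++ [a]) (by simp; omega) (by simp)
    · rw [pvA_pad, if_neg hl, pvB_pad.eq_def, h]
      simp only [if_neg hl]

lemma pvClamp_eq (m : List Char) :
    (if 16 ≤ m.length then
      (if PySem.List.pyGet? (PySem.List.slice m (some 0) (some 15)) (-1) = some '.' then
         PySem.List.slice (PySem.List.slice m (some 0) (some 15)) (some 0)
           (some (((PySem.List.slice m (some 0) (some 15)).length : Int) - 1))
       else PySem.List.slice m (some 0) (some 15))
     else m)
    = (if 15 < m.length then
        (if (m.take 15).getLast? = some '.' then (m.take 15).dropLast else m.take 15)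
       else m) := by
  have hiff : 16 ≤ m.length ↔ 15 < m.length := by omega
  have hsl : PySem.List.slice m (some 0) (some 15) = m.take 15 := by
    rw [show ((0:Int)) = ((0:Nat):Int) from rfl, show ((15:Int)) = ((15:Nat):Int) from by norm_num,
      PySem.List.slice_natCast]
    simp
  rw [hsl]
  exact if_congr hiff (pvStrip_last _) rfl

lemma pvStage1_eq (m : List Char) : pvA_strip1 m = pvB_strip1 m := by
  unfold pvA_strip1 pvB_strip1; exact pvStrip_last m

lemma pvStage2_eq (m : List Char) : pvA_strip2 m = pvB_strip2 m := by
  unfold pvA_strip2 pvB_strip2; exact pvStrip_head m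

lemma pvDefault_eq (m : List Char) : pvA_default m = pvB_default m := rfl

lemma pvStage4_eq (m : List Char) : pvA_clamp m = pvB_clamp m := by
  unfold pvA_clamp pvB_clamp; exact pvClamp_eq m

lemma pvDefault_ne (m : List Char) : pvB_default m ≠ [] := by
  unfold pvB_default; split <;> simp_all

lemma pvClampB_ne (m : List Char) (h : m ≠ []) : pvB_clamp m ≠ [] := by
  unfold pvB_clamp
  by_cases hl : 15 < m.length
  · rw [if_pos hl]
    have ht : (m.take 15).length = 15 := by simp; omega
    by_cases hd : (m.take 15).getLast? = some '.'
    · simp only [if_pos hd]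
      intro he
      have := congrArg List.length he
      simp [ht] at this
    · simp only [if_neg hd]
      intro he
      rw [he] at ht
      simp at ht
  · rw [if_neg hl]; exact h

theorem solution_eq (new_id : String) : solution new_id = solution_alt new_id := by
  show (let s6 := pvA_clamp (pvA_default (pvA_strip2 (pvA_strip1 (pvA_dots
          ((PySem.Chars.lower new_id.toList).foldl
            (fun t i => if pvA_check i then t else PySem.Chars.replace t [i] [])
            (PySem.Chars.lower new_id.toList))))));
        match PySem.List.pyGet? s6 (-1) with
        | some a => String.ofList (pvA_pad a s6)
        | none => String.ofList s6)
      = String.ofList (pvB_pad (pvB_clamp (pvB_default (pvB_strip2 (pvB_strip1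
          ((PySem.Chars.lower new_id.toList).foldl pvB_scan []))))))
  simp only []
  rw [pvA_remove_self, pvA_dots_eq, pvB_scan_eq]
  rw [show (decide ((([] : List Char)).getLast? = some '.')) = false from by decide]
  rw [List.nil_append]
  generalize pvColl false (List.filter pvA_check (PySem.Chars.lower new_id.toList)) = m
  rw [pvStage1_eq, pvStage2_eq, pvDefault_eq, pvStage4_eq]
  have h4 := pvClampB_ne _ (pvDefault_ne (pvB_strip2 (pvB_strip1 m)))
  generalize hq : pvB_clamp (pvB_default (pvB_strip2 (pvB_strip1 m))) = m4
  rw [hq] at h4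
  cases h : m4.getLast? with
  | none => exact absurd (List.getLast?_eq_none_iff.mp h) h4
  | some a =>
    rw [pvGet_neg_one, h]
    exact congrArg String.ofList (pvPad_eq 3 a m4 (by omega) h)

-- ===== VERDICT (by name: the statement is the Claim_ definition above) =====
theorem solution_spec : Claim_equal_solution := by
  intro new_id _
  unfold Spec_solution
  exact solution_eq new_id
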